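-- pv_equiv track=rewrite | github.com/Bezik1/BEZIK | structure/Executor.py | join_quotes
-- ===== SOURCE A (Python) =====
-- def join_quotes(lst):
--     result = []
--     i = 0
--     while i < len(lst):
--         if lst[i] == "'":
--             quoted_str = lst[i]
--             i += 1
--             while i < len(lst) and lst[i] != "'":
--                 quoted_str += lst[i]
--                 i += 1
--             if i < len(lst) and lst[i] == "'":
--                 quoted_str += lst[i]
--             result.append(quoted_str)
--         else:
--             result.append(lst[i])
--         i += 1
--     return result
-- ===== SOURCE B (Python) =====
-- def join_quotes(lst):
--     result = []
--     in_quote = False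
--     buffer = []
--     for tok in lst:
--         if tok == "'":
--             if in_quote:
--                 buffer.append("'")
--                 result.append(''.join(buffer))
--                 in_quote = False
--                 buffer = []
--             else:
--                 in_quote = True
--                 buffer = ["'"]
--         elif in_quote:
--             buffer.append(tok)
--         else:
--             result.append(tok)
--     if in_quote:
--         result.append(''.join(buffer))
--     return result
-- ===== Notes on version B (the rewrite author's own statement) =====
-- stated objective: simpler
-- what changed: Replaces A's index-driven nested while loops with a single flat pass maintaining an in_quote flag and a token buffer, joining the buffer when a quote closes (or at end of input for an unclosed quote).
import Mathlib
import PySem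

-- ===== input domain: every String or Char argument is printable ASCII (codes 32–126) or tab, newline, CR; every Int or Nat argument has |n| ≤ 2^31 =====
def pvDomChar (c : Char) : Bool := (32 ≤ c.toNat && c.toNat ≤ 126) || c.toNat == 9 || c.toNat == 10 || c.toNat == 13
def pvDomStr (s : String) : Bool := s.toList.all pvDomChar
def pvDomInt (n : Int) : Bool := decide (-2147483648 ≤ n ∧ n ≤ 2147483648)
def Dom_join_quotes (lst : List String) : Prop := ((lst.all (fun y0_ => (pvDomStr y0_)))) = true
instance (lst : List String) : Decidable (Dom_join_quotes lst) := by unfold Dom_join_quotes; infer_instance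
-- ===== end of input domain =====

-- B rewrites A's nested index-driven while loops as one flat pass with an in_quote flag and a buffer (objective: simpler).

-- ===== PORT A =====
-- inner while: accumulate tokens into quoted_str until the closing "'" (which is appended) or end of list;
-- returns the merged string and the remaining suffix after the closing quote
def jqConsume (acc : String) : List String → String × List String
  | [] => (acc, [])
  | x :: xs => if x == "'" then (acc ++ "'", xs) else jqConsume (acc ++ x) xs

theorem jqConsume_len (acc : String) (xs : List String) :
    (jqConsume acc xs).2.length ≤ xs.length := by
  induction xs generalizing acc with
  | nil => simp [jqConsume]
  | cons x xs ih =>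
    simp only [jqConsume]
    split
    · simp
    · exact le_trans (ih _) (Nat.le_succ _)

-- outer while over the index i, transcribed as recursion on the remaining suffix
def join_quotes (lst : List String) : List String :=
  match lst with
  | [] => []
  | t :: rest =>
    if t == "'" then
      let p := jqConsume "'" rest
      p.1 :: join_quotes p.2
    else
      t :: join_quotes rest
termination_by lst.length
decreasing_by
  · exact Nat.lt_succ_of_le (jqConsume_len _ _)
  · simp

-- ===== PORT B =====
-- single pass: state = (in_quote, buffer); '.join' of the buffer on a closing quote / at the end
def jqGo (inq : Bool) (buf : List String) : List String → List String
  | [] => if inq then [String.join buf] else []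
  | x :: xs =>
    if x == "'" then
      if inq then String.join (buf ++ ["'"]) :: jqGo false [] xs
      else jqGo true ["'"] xs
    else
      if inq then jqGo inq (buf ++ [x]) xs
      else x :: jqGo inq buf xs

def join_quotes_alt (lst : List String) : List String := jqGo false [] lst

-- ===== PRECONDITION & SPEC =====
def Spec_join_quotes (lst : List String) (out : List String) : Prop := out = join_quotes_alt lst
instance (lst : List String) (out : List String) : Decidable (Spec_join_quotes lst out) := by unfold Spec_join_quotes; infer_instance

-- ===== CLAIM (what is proved, stated in full; the proofs are below) =====
def Claim_equal_join_quotes : Prop := ∀ (lst : List String), Dom_join_quotes lst → Spec_join_quotes lst (join_quotes lst)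

-- ===== LEMMAS AND PROOFS =====
theorem jq_join_append (l : List String) (s : String) :
    String.join (l ++ [s]) = String.join l ++ s := by
  simp [String.join, List.foldl_append, List.foldl]

theorem jqGo_true (xs : List String) (buf : List String) :
    jqGo true buf xs =
      (jqConsume (String.join buf) xs).1 :: jqGo false [] (jqConsume (String.join buf) xs).2 := by
  induction xs generalizing buf with
  | nil => simp [jqGo, jqConsume]
  | cons x xs ih =>
    by_cases hx : x = "'"
    · simp [jqGo, jqConsume, hx, jq_join_append]
    · simp [jqGo, jqConsume, hx, ih, jq_join_append]

theorem jq_agree_aux (n : Nat) : ∀ lst : List String, lst.length ≤ n → join_quotes lst = jqGo false [] lst := by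
  induction n with
  | zero =>
    intro lst h
    have : lst = [] := List.eq_nil_of_length_eq_zero (Nat.le_zero.mp h)
    subst this; simp [join_quotes, jqGo]
  | succ n ih =>
    intro lst h
    match lst with
    | [] => simp [join_quotes, jqGo]
    | t :: rest =>
      by_cases ht : t = "'"
      · have hrec : join_quotes (jqConsume "'" rest).2 = jqGo false [] (jqConsume "'" rest).2 :=
          ih _ (le_trans (jqConsume_len _ _) (by simpa using h))
        simp only [join_quotes, jqGo, ht, beq_self_eq_true, if_true]
        rw [jqGo_true]
        have hb : String.join (["'"] : List String) = "'" := by simp [String.join]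
        rw [hb]
        exact congrArg _ hrec
      · simp only [join_quotes, jqGo, beq_iff_eq, ht, if_false]
        exact congrArg _ (ih rest (by simpa using Nat.le_of_succ_le_succ h))

theorem jq_agree (lst : List String) : join_quotes lst = jqGo false [] lst :=
  jq_agree_aux lst.length lst le_rfl

-- ===== VERDICT (by name: the statement is the Claim_ definition above) =====
theorem join_quotes_spec : Claim_equal_join_quotes := by
  intro lst _
  unfold Spec_join_quotes join_quotes_alt
  exact jq_agree lst
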